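-- pv_equiv track=rewrite | github.com/Jarne2001/Concepts-of-Data-Science-Project | ternary_search_tree.py | best_case
-- ===== SOURCE A (Python) =====
-- def best_case(words):
--     """
--     This function builds a list of words for the best case with
--     the words forming a balanced tree as much as possible.
--     """
--     words = sorted(words)
--     best_words = []
--     stack = [(0, len(words) - 1)]
--     while len(stack) > 0:
--         item = stack.pop()
--         lo = item[0]
--         hi = item[1]
--         if hi >= lo:
--             median = (lo + hi) // 2
--             stack.append((lo, median - 1))
--             stack.append((median + 1, hi))
--             best_words.append(words[median])
--         else:
--             continue
--     return best_words
-- ===== SOURCE B (Python) =====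
-- def best_case(words):
--     """Balanced-insertion order: median first, then right half, then left half."""
--     words = sorted(words)
--     result = []
--
--     def rec(lo, hi):
--         if hi < lo:
--             return
--         median = (lo + hi) // 2
--         result.append(words[median])
--         rec(median + 1, hi)
--         rec(lo, median - 1)
--
--     rec(0, len(words) - 1)
--     return result
-- ===== Notes on version B (the rewrite author's own statement) =====
-- stated objective: simpler
-- what changed: Replaces the explicit stack/while loop with a recursive helper over index ranges (emit median, recurse right half first, then left half), matching the stack's LIFO order.
import Mathlib
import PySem

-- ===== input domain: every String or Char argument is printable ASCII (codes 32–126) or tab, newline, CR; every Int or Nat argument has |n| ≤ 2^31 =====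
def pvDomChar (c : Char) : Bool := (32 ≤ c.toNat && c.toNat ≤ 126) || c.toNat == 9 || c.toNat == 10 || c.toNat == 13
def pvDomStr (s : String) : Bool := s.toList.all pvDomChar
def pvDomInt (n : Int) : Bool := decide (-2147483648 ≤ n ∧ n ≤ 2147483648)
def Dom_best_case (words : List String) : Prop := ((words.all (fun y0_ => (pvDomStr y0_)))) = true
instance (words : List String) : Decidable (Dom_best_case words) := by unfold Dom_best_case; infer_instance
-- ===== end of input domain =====

-- B replaces A's explicit stack/while loop by a recursive helper over index ranges
-- (median, then right half, then left half); same output, simpler decomposition.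

-- ===== PORT A =====
-- the while-loop over the explicit stack (head of the list = top of the stack).
-- `fuel` only makes the loop total (2*len+1 iterations always suffice, proved below);
-- the index `median` is always in range on states reachable from best_case, so the
-- `.getD ""` default is never taken there.
def pvLoopA (ws : List String) : Nat → List (Int × Int) → List String → List String
  | 0, _, acc => acc
  | _ + 1, [], acc => acc
  | fuel + 1, (lo, hi) :: rest, acc =>
    if hi ≥ lo then
      let median := PySem.Int.floordiv (lo + hi) 2
      pvLoopA ws fuel ((median + 1, hi) :: (lo, median - 1) :: rest)
        (acc ++ [(PySem.List.pyGet? ws median).getD ""])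
    else
      pvLoopA ws fuel rest acc

def best_case (words : List String) : List String :=
  let ws := PySem.List.sorted words (fun w => w)
  pvLoopA ws (2 * ws.length + 1) [(0, (ws.length : Int) - 1)] []

-- ===== PORT B =====
-- the recursive helper of Source B; `fuel` only makes it total (len+1 always suffices).
def pvRecB (ws : List String) : Nat → Int → Int → List String
  | 0, _, _ => []
  | fuel + 1, lo, hi =>
    if hi < lo then []
    else
      let median := PySem.Int.floordiv (lo + hi) 2
      (PySem.List.pyGet? ws median).getD "" ::
        (pvRecB ws fuel (median + 1) hi ++ pvRecB ws fuel lo (median - 1))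

def best_case_alt (words : List String) : List String :=
  let ws := PySem.List.sorted words (fun w => w)
  pvRecB ws (ws.length + 1) 0 ((ws.length : Int) - 1)

-- ===== PRECONDITION & SPEC =====
def Spec_best_case (words : List String) (out : List String) : Prop := out = best_case_alt words
instance (words : List String) (out : List String) : Decidable (Spec_best_case words out) := by unfold Spec_best_case; infer_instance

-- ===== CLAIM (what is proved, stated in full; the proofs are below) =====
def Claim_equal_best_case : Prop := ∀ (words : List String), Dom_best_case words → Spec_best_case words (best_case words)

-- ===== LEMMAS AND PROOFS =====

-- the fuel-free emission function both ports compute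
def pvEmit (ws : List String) (lo hi : Int) : List String :=
  if hi < lo then []
  else
    let median := PySem.Int.floordiv (lo + hi) 2
    (PySem.List.pyGet? ws median).getD "" ::
      (pvEmit ws (median + 1) hi ++ pvEmit ws lo (median - 1))
termination_by (hi + 1 - lo).toNat
decreasing_by
  all_goals
    have h := PySem.Int.floordiv_two_mid_bounds (lo := lo) (hi := hi) (by omega)
    omega

theorem pvRecB_eq_emit (ws : List String) :
    ∀ (fuel : Nat) (lo hi : Int), (hi + 1 - lo).toNat < fuel →
      pvRecB ws fuel lo hi = pvEmit ws lo hi := by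
  intro fuel
  induction fuel with
  | zero => intro lo hi h; omega
  | succ f ih =>
      intro lo hi h
      rw [pvRecB, pvEmit.eq_def]
      by_cases hc : hi < lo
      · simp [hc]
      · have hm := PySem.Int.floordiv_two_mid_bounds (lo := lo) (hi := hi) (by omega)
        simp only [hc, if_neg, not_false_iff]
        rw [ih (PySem.Int.floordiv (lo + hi) 2 + 1) hi (by omega),
            ih lo (PySem.Int.floordiv (lo + hi) 2 - 1) (by omega)]

-- weight of a stack entry: the number of loop iterations its processing costs
def pvWt (p : Int × Int) : Nat := 2 * (p.2 + 1 - p.1).toNat + 1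

theorem pvLoopA_eq_emit (ws : List String) :
    ∀ (fuel : Nat) (st : List (Int × Int)) (acc : List String),
      (st.map pvWt).sum ≤ fuel →
      pvLoopA ws fuel st acc = acc ++ st.flatMap (fun p => pvEmit ws p.1 p.2) := by
  intro fuel
  induction fuel with
  | zero =>
      intro st acc h
      cases st with
      | nil => simp [pvLoopA]
      | cons p rest => simp [pvWt] at h
  | succ f ih =>
      intro st acc h
      cases st with
      | nil => simp [pvLoopA]
      | cons p rest =>
          obtain ⟨lo, hi⟩ := p
          by_cases hc : hi ≥ lo
          · have hm := PySem.Int.floordiv_two_mid_bounds (lo := lo) (hi := hi) (by omega)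
            have hemit : pvEmit ws lo hi =
                (PySem.List.pyGet? ws (PySem.Int.floordiv (lo + hi) 2)).getD "" ::
                  (pvEmit ws (PySem.Int.floordiv (lo + hi) 2 + 1) hi ++
                   pvEmit ws lo (PySem.Int.floordiv (lo + hi) 2 - 1)) := by
              rw [pvEmit.eq_def]
              simp [show ¬ hi < lo from by omega]
            rw [pvLoopA, if_pos hc,
                ih _ _ (by simp only [List.map_cons, List.sum_cons, pvWt] at h ⊢; omega)]
            simp [hemit, List.flatMap_cons, List.append_assoc]
          · have hemit : pvEmit ws lo hi = [] := by
              rw [pvEmit.eq_def]; simp [show hi < lo from by omega]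
            rw [pvLoopA, if_neg hc,
                ih _ _ (by simp only [List.map_cons, List.sum_cons, pvWt] at h; omega)]
            simp [hemit, List.flatMap_cons]

-- ===== VERDICT (by name: the statement is the Claim_ definition above) =====
theorem best_case_spec : Claim_equal_best_case := by
  intro words _
  unfold Spec_best_case best_case best_case_alt
  rw [pvLoopA_eq_emit _ _ _ _ (by simp [pvWt]),
      pvRecB_eq_emit _ _ _ _ (by omega)]
  simp
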